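-- pv_equiv track=rewrite | github.com/py-algorithm/algorithm | Programmers/99mini/봉인된 주문.py | solution
-- ===== SOURCE A (Python) =====
-- def solution(n, bans):
--
--     unit = ord('z') - ord('a') + 1
--
--     def alpha_of(val):
--         curr = val
--         ret = ''
--         while curr > 0:
--             remain = curr % unit
--
--             ret += chr(remain + ord('a') - 1)
--             curr //= unit
--
--         return ret[::-1]
--
--     removed = 0
--
--     for ban in sorted(bans, key=lambda x: (len(x), x)):
--         alpha = 0
--         for idx, b in enumerate(ban[::-1]):
--             alpha += ((ord(b) - ord('a') + 1)) * unit ** idx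
--         if alpha <= n + removed:
--             removed += 1
--
--     return alpha_of(n + removed)
-- ===== SOURCE B (Python) =====
-- def solution(n, bans):
--     # Rank each ban once (Horner), sort the integer ranks, count the skipped
--     # prefix with an early break, and rebuild the word recursively.
--
--     def rank(word):
--         v = 0
--         for ch in word:
--             v = v * 26 + (ord(ch) - ord('a') + 1)
--         return v
--
--     def word_of(v):
--         if v <= 0:
--             return ''
--         return word_of(v // 26) + chr(v % 26 + ord('a') - 1)
--
--     vals = sorted(rank(b) for b in bans)
--     removed = 0
--     for a in vals:
--         if a > n + removed:
--             break
--         removed += 1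
--
--     return word_of(n + removed)
-- ===== Notes on version B (the rewrite author's own statement) =====
-- stated objective: faster
-- what changed: B ranks every ban once with a Horner pass into an integer list and sorts those integers (instead of sorting the strings by a (len, str) tuple key and re-deriving each rank with a positional-powers loop over the reversed string), counts the skipped prefix with an early break instead of scanning the whole list with a running conditional accumulator, and rebuilds the answer word by recursion instead of building the reversed digit string and reversing it; comparisons become single int compares and each rank is computed once.
-- outside the precondition, e.g. on solution(4, ['e', 'aG']): A returns 'e', B returns 'f'
import Mathlib
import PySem

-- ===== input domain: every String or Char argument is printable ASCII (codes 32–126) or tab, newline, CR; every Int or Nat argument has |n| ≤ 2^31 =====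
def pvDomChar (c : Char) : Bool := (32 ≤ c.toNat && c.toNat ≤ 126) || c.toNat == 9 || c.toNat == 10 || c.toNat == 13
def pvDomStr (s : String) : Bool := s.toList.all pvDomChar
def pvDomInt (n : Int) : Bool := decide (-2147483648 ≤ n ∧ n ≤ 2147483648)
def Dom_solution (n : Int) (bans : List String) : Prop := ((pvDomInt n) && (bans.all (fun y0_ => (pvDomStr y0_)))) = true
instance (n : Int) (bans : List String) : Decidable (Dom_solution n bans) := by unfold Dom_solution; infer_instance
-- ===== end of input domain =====

-- B replaces A's tuple-key string sort + per-ban positional-powers loop + reversed digit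
-- string by an integer-rank sort, an early-break prefix count and a recursive word builder
-- (objective: alternative).

-- ===== PORT A =====
-- A's inner loop 'for idx, b in enumerate(ban[::-1]): alpha += (ord(b)-ord('a')+1) * unit**idx'
-- (enumerate indices start at 0, so `p.1.toNat` is exactly Python's nonnegative exponent idx).
def aAlpha (ban : String) : Int :=
  (PySem.List.enumerate ban.toList.reverse).foldl
    (fun alpha p => alpha + ((p.2.toNat : Int) - 97 + 1) * 26 ^ p.1.toNat) 0

-- A's 'while curr > 0: ret += chr(remain + ord('a') - 1); curr //= unit'
-- (chr = Char.ofNat; the argument is in 96..121 here, so it is exact).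
def aDigits (curr : Int) (ret : List Char) : List Char :=
  if h : 0 < curr then
    aDigits (PySem.Int.floordiv curr 26) (ret ++ [Char.ofNat ((PySem.Int.mod curr 26) + 96).toNat])
  else ret
termination_by curr.toNat
decreasing_by
  rw [PySem.Int.floordiv_eq_ediv_of_pos (by norm_num)]
  have h1 : curr / 26 < curr := by rw [Int.ediv_lt_iff_lt_mul (by norm_num)]; nlinarith
  have h2 : 0 ≤ curr / 26 := Int.ediv_nonneg (le_of_lt h) (by norm_num)
  omega

-- key=lambda x: (len(x), x): Python compares the tuples lexicographically and strings by
-- code points, which is the Prod.Lex order on Int × List Char over each string's toList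
-- (the same comparisons PySem.List.sorted2 with PySem.Chars.strLt performs).
def solution (n : Int) (bans : List String) : String :=
  let removed :=
    (PySem.List.sorted bans (fun x => toLex ((PySem.Str.len x, x.toList) : Int × List Char))).foldl
      (fun removed ban => if aAlpha ban ≤ n + removed then removed + 1 else removed) 0
  String.mk ((aDigits (n + removed) []).reverse)   -- ret[::-1]

-- ===== PORT B =====
-- Source B rank(): one Horner pass over the word.
def bRank (w : String) : Int :=
  w.toList.foldl (fun v c => v * 26 + ((c.toNat : Int) - 97 + 1)) 0

-- Source B word_of(): recursive word builder.
def bWord (v : Int) : List Char :=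
  if h : v ≤ 0 then []
  else bWord (PySem.Int.floordiv v 26) ++ [Char.ofNat ((PySem.Int.mod v 26) + 96).toNat]
termination_by v.toNat
decreasing_by
  rw [PySem.Int.floordiv_eq_ediv_of_pos (by norm_num)]
  have h0 : 0 < v := by omega
  have h1 : v / 26 < v := by rw [Int.ediv_lt_iff_lt_mul (by norm_num)]; nlinarith
  have h2 : 0 ≤ v / 26 := Int.ediv_nonneg (le_of_lt h0) (by norm_num)
  omega

-- Source B prefix loop: 'for a in vals: if a > n + removed: break; removed += 1'.
def bCount (n : Int) (removed : Int) : List Int → Int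
  | [] => removed
  | a :: t => if a > n + removed then removed else bCount n (removed + 1) t

def solution_alt (n : Int) (bans : List String) : String :=
  let vals := PySem.List.sorted (bans.map bRank) (fun x => x)
  String.mk (bWord (n + bCount n 0 vals))

-- ===== PRECONDITION & SPEC =====
-- Pre_ excludes ban lists (only possible with non-lowercase characters) whose Python
-- (len, str) sort order disagrees with the order of their bijective-base-26 ranks: there
-- A's skip count is an accident of its processing order and B's of numeric order, and
-- neither value is the specified one for this lowercase-word puzzle.
def Pre_solution (n : Int) (bans : List String) : Prop :=
  ∀ a ∈ bans, ∀ b ∈ bans,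
    toLex ((PySem.Str.len a, a.toList) : Int × List Char) ≤ toLex ((PySem.Str.len b, b.toList) : Int × List Char) →
      bRank a ≤ bRank b
instance (n : Int) (bans : List String) : Decidable (Pre_solution n bans) := by
  unfold Pre_solution; infer_instance

def pvWitness_solution : Int × List String := (3, ["a", "c"])

def Spec_solution (n : Int) (bans : List String) (out : String) : Prop := out = solution_alt n bans
instance (n : Int) (bans : List String) (out : String) : Decidable (Spec_solution n bans out) := by
  unfold Spec_solution; infer_instance

-- ===== CLAIM (what is proved, stated in full; the proofs are below) =====
def Claim_equal_solution : Prop := ∀ (n : Int) (bans : List String), Dom_solution n bans → Pre_solution n bans → Spec_solution n bans (solution n bans)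

-- ===== LEMMAS AND PROOFS =====

-- Horner fold with an arbitrary accumulator.
lemma bRank_fold_acc (cs : List Char) : ∀ (a : Int),
    cs.foldl (fun v c => v * 26 + ((c.toNat : Int) - 97 + 1)) a
      = a * 26 ^ cs.length + cs.foldl (fun v c => v * 26 + ((c.toNat : Int) - 97 + 1)) 0 := by
  induction cs with
  | nil => intro a; simp
  | cons c t ih =>
      intro a
      simp only [List.foldl_cons, List.length_cons]
      rw [ih (a * 26 + _), ih (0 * 26 + _)]
      ring

-- A's positional-powers sum over the reversed word equals B's Horner pass.
lemma aAlpha_eq_bRank (s : String) : aAlpha s = bRank s := by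
  unfold aAlpha bRank
  generalize s.toList = cs
  induction cs with
  | nil => simp
  | cons c t ih =>
      rw [List.reverse_cons, PySem.List.enumerate_append, List.foldl_append]
      simp only [PySem.List.enumerate, List.foldl_cons, List.foldl_nil, List.foldl_cons]
      rw [ih]
      rw [bRank_fold_acc t (0 * 26 + ((c.toNat : Int) - 97 + 1))]
      simp [Int.toNat_natCast]
      ring

-- A stationary scan: if every element exceeds the bound, the accumulator never moves.
lemma foldl_scan_stuck (n : Int) : ∀ (L : List Int) (r : Int), (∀ x ∈ L, ¬ x ≤ n + r) →
    L.foldl (fun removed a => if a ≤ n + removed then removed + 1 else removed) r = r := by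
  intro L
  induction L with
  | nil => intro r _; rfl
  | cons a t ih =>
      intro r h
      simp only [List.foldl_cons, if_neg (h a (List.mem_cons_self))]
      exact ih r (fun x hx => h x (List.mem_cons_of_mem a hx))

-- On a non-decreasing list, A's full conditional scan equals B's early-break prefix count.
lemma foldl_scan_eq_bCount (n : Int) : ∀ (L : List Int), L.Pairwise (· ≤ ·) → ∀ (r : Int),
    L.foldl (fun removed a => if a ≤ n + removed then removed + 1 else removed) r = bCount n r L := by
  intro L
  induction L with
  | nil => intro _ r; rfl
  | cons a t ih =>
      intro hp r
      rw [List.pairwise_cons] at hp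
      simp only [List.foldl_cons, bCount]
      by_cases h : a ≤ n + r
      · rw [if_pos h, if_neg (by omega)]
        exact ih hp.2 (r + 1)
      · rw [if_neg h, if_pos (by omega)]
        exact foldl_scan_stuck n t r (fun x hx => by have := hp.1 x hx; omega)

-- Under Pre_, ranking after A's (len, str) sort is sorting the ranks.
lemma map_rank_sorted (bans : List String) (hpre : Pre_solution 0 bans) :
    (PySem.List.sorted bans (fun x => toLex ((PySem.Str.len x, x.toList) : Int × List Char))).map bRank
      = PySem.List.sorted (bans.map bRank) (fun x => x) := by
  refine (PySem.List.sorted_id_eq_of_perm_of_pairwise (bans.map bRank) _ ?_ ?_).symm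
  · exact (PySem.List.sorted_perm bans _ false).map bRank
  · refine List.pairwise_map.mpr ?_
    refine (PySem.List.sorted_pairwise bans _).imp_of_mem ?_
    intro a b ha hb hk
    exact hpre a ((PySem.List.mem_sorted bans _ false a).mp ha)
      b ((PySem.List.mem_sorted bans _ false b).mp hb) hk

-- A's digit accumulator, reversed, is B's recursive word.
lemma aDigits_eq_bWord (v : Int) (acc : List Char) : aDigits v acc = acc ++ (bWord v).reverse := by
  induction v, acc using aDigits.induct with
  | case1 v acc h ih =>
      rw [aDigits, bWord]
      simp only [dif_pos h, dif_neg (by omega : ¬ v ≤ 0)]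
      rw [ih]
      simp
  | case2 v acc h =>
      rw [aDigits, bWord]
      simp only [dif_neg h, dif_pos (by omega : v ≤ 0)]
      simp

-- ===== VERDICT (by name: the statement is the Claim_ definition above) =====
theorem solution_spec : Claim_equal_solution := by
  intro n bans _ hpre
  unfold Spec_solution solution solution_alt
  have hrm :
      (PySem.List.sorted bans (fun x => toLex ((PySem.Str.len x, x.toList) : Int × List Char))).foldl
        (fun removed ban => if aAlpha ban ≤ n + removed then removed + 1 else removed) 0
      = bCount n 0 (PySem.List.sorted (bans.map bRank) (fun x => x)) := by
    simp only [aAlpha_eq_bRank]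
    rw [← List.foldl_map (f := bRank)
          (g := fun removed a => if a ≤ n + removed then removed + 1 else removed)]
    rw [map_rank_sorted bans (by exact hpre)]
    exact foldl_scan_eq_bCount n _ (PySem.List.sorted_pairwise (bans.map bRank) _) 0
  simp only [hrm, aDigits_eq_bWord, List.nil_append, List.reverse_reverse]
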